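-- pv_equiv track=rewrite | github.com/mustafakutay/3AP-in-Subsets-of-Z_N | 3AP_counter_Sp^4.py | brute_force_3AP_count
-- ===== SOURCE A (Python) =====
-- def brute_force_3AP_count(S, mod):
--     """
--        This counts the number of 3-term arithmetic progressions among ordered triples (x,y,z) in a given set S,
--     where each triple is counted individually. The element x,y,z must be distinct and satisfy
--     the condition of forming an arithmetic progression.
--
--     """
--     count = 0
--     n = len(S)
--     for i in range(n):
--         for j in range(n):
--             if j == i:
--                 continue
--             for k in range(n):
--                 if k == i or k == j:
--                     continue
--                 x, y, z = S[i], S[j], S[k]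
--                 if (y - x) % mod == (z - y) % mod:
--                     count += 1
--     return count
-- ===== SOURCE B (Python) =====
-- def brute_force_3AP_count(S, mod):
--     # Hash the residues of 2*y once, then for each ordered pair (x,z) look up
--     # how many middle elements y satisfy 2*y = x + z (mod), correcting for y
--     # reusing x's or z's index: O(n^2) instead of A's O(n^3).
--     n = len(S)
--     if n < 3:
--         return 0
--     d = {}
--     for v in S:
--         key = (2 * v) % mod
--         d[key] = d.get(key, 0) + 1
--     count = 0
--     for i in range(n):
--         for k in range(n):
--             if k == i:
--                 continue
--             x, z = S[i], S[k]
--             count += d.get((x + z) % mod, 0) - 2 * ((x - z) % mod == 0)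
--     return count
-- ===== Notes on version B (the rewrite author's own statement) =====
-- stated objective: faster
-- what changed: B replaces A's cubic scan over all index triples by a hash table counting residues of 2*y mod `mod` built in one pass, then for each ordered pair (x,z) looks up the number of middles y with 2*y ≡ x+z and subtracts the two degenerate middles y=x and y=z.
import Mathlib
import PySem

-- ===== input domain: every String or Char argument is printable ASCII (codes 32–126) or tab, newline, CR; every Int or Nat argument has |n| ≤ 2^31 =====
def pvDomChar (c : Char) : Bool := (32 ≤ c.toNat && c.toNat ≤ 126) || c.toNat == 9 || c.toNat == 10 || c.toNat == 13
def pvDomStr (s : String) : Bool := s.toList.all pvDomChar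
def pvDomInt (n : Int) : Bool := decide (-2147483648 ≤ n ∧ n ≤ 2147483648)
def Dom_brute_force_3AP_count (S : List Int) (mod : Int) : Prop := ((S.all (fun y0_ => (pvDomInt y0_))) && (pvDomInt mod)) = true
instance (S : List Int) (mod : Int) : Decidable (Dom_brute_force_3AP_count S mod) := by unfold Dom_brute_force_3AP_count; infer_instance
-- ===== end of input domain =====

-- B replaces A's cubic triple loop by a residue table of 2*y mod `mod` plus a
-- quadratic pair scan (objective: faster, O(n^2) vs O(n^3)).

-- ===== PORT A =====
def brute_force_3AP_count (S : List Int) (mod : Int) : Int :=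
  let n : Int := (S.length : Int)
  (PySem.List.pyRange 0 n 1).foldl (fun count i =>
    (PySem.List.pyRange 0 n 1).foldl (fun count j =>
      if j = i then count
      else
        (PySem.List.pyRange 0 n 1).foldl (fun count k =>
          if k = i ∨ k = j then count
          else
            let x := PySem.List.pyGetD S i 0
            let y := PySem.List.pyGetD S j 0
            let z := PySem.List.pyGetD S k 0
            if PySem.Int.mod (y - x) mod = PySem.Int.mod (z - y) mod then count + 1
            else count) count) count) 0

-- ===== PORT B =====
def brute_force_3AP_count_alt (S : List Int) (mod : Int) : Int :=
  let n : Int := (S.length : Int)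
  if n < 3 then 0
  else
    let d : PySem.Dict Int Int := S.foldl (fun d v =>
      let key := PySem.Int.mod (2 * v) mod
      d.insert key (d.getD key 0 + 1)) PySem.Dict.empty
    (PySem.List.pyRange 0 n 1).foldl (fun count i =>
      (PySem.List.pyRange 0 n 1).foldl (fun count k =>
        if k = i then count
        else
          let x := PySem.List.pyGetD S i 0
          let z := PySem.List.pyGetD S k 0
          count + d.getD (PySem.Int.mod (x + z) mod) 0
                - 2 * (if PySem.Int.mod (x - z) mod = 0 then 1 else 0)) count) 0

-- ===== PRECONDITION & SPEC =====
-- Pre_ only excludes inputs where A raises ZeroDivisionError: mod = 0 with at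
-- least 3 elements (with fewer than 3 elements the inner '%' is never reached).
def Pre_brute_force_3AP_count (S : List Int) (mod : Int) : Prop :=
  S.length < 3 ∨ mod ≠ 0
instance (S : List Int) (mod : Int) : Decidable (Pre_brute_force_3AP_count S mod) := by
  unfold Pre_brute_force_3AP_count; infer_instance

def pvWitness_brute_force_3AP_count : List Int × Int := ([0, 1, 2], 3)

def Spec_brute_force_3AP_count (S : List Int) (mod : Int) (out : Int) : Prop := out = brute_force_3AP_count_alt S mod
instance (S : List Int) (mod : Int) (out : Int) : Decidable (Spec_brute_force_3AP_count S mod out) := by unfold Spec_brute_force_3AP_count; infer_instance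

-- ===== CLAIM (what is proved, stated in full; the proofs are below) =====
def Claim_equal_brute_force_3AP_count : Prop := ∀ (S : List Int) (mod : Int), Dom_brute_force_3AP_count S mod → Pre_brute_force_3AP_count S mod → Spec_brute_force_3AP_count S mod (brute_force_3AP_count S mod)

-- ===== LEMMAS AND PROOFS =====

-- the index range 0..n-1 and S[i]
def pvR (S : List Int) : List Int := PySem.List.pyRange 0 (S.length : Int) 1
def pvG (S : List Int) (i : Int) : Int := PySem.List.pyGetD S i 0

-- a fold whose step just adds a per-element amount is a sum
theorem pv_foldl_add (l : List Int) (f : Int → Int → Int) (g : Int → Int)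
    (h : ∀ acc x, f acc x = acc + g x) (a : Int) :
    l.foldl f a = a + (l.map g).sum := by
  induction l generalizing a with
  | nil => simp
  | cons x t ih => rw [List.foldl_cons, h, ih, List.map_cons, List.sum_cons]; ring

-- exchanging a double list sum
theorem pv_sum_swap (l₁ l₂ : List Int) (f : Int → Int → Int) :
    (l₁.map (fun a => (l₂.map (fun b => f a b)).sum)).sum
      = (l₂.map (fun b => (l₁.map (fun a => f a b)).sum)).sum := by
  induction l₁ with
  | nil => simp
  | cons a t ih =>
      rw [List.map_cons, List.sum_cons, ih]
      simp only [List.map_cons, List.sum_cons]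
      rw [PySem.List.sum_map_add_int]

-- summing an indicator of a single element of a duplicate-free list
theorem pv_sum_single (l : List Int) (i : Int) (c : Int) (hn : l.Nodup) (hi : i ∈ l) :
    (l.map (fun j => if j = i then c else 0)).sum = c := by
  induction l with
  | nil => cases hi
  | cons a t ih =>
      rw [List.map_cons, List.sum_cons]
      rcases List.nodup_cons.mp hn with ⟨ha, ht⟩
      by_cases h : a = i
      · subst h
        rw [if_pos rfl]
        have hz : t.map (fun j => if j = a then c else 0) = t.map (fun _ => (0 : Int)) := by
          apply List.map_congr_left
          intro j hj
          have hja : j ≠ a := by rintro rfl; exact ha hj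
          simp [hja]
        simp [hz]
      · rcases List.mem_cons.mp hi with h' | h'
        · exact absurd h'.symm h
        · rw [if_neg h, ih ht h']; ring

-- Python '%' with equal results is divisibility of the difference (mod ≠ 0)
theorem pv_mod_eq_iff (a b m : Int) (hm : m ≠ 0) :
    PySem.Int.mod a m = PySem.Int.mod b m ↔ m ∣ (a - b) := by
  have ha := PySem.Int.floordiv_mul_add_mod a m
  have hb := PySem.Int.floordiv_mul_add_mod b m
  constructor
  · intro h
    exact ⟨PySem.Int.floordiv a m - PySem.Int.floordiv b m, by linear_combination hb - ha + h⟩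
  · rintro ⟨t, ht⟩
    have hd : m ∣ (PySem.Int.mod a m - PySem.Int.mod b m) :=
      ⟨t - (PySem.Int.floordiv a m - PySem.Int.floordiv b m), by linear_combination ha - hb + ht⟩
    rcases lt_or_gt_of_ne hm with hneg | hpos
    · have b1 := PySem.Int.mod_neg_bounds a hneg
      have b2 := PySem.Int.mod_neg_bounds b hneg
      have hd' : (-m) ∣ (PySem.Int.mod a m - PySem.Int.mod b m) := (neg_dvd).mpr hd
      have h0 : PySem.Int.mod a m - PySem.Int.mod b m = 0 :=
        Int.eq_zero_of_abs_lt_dvd hd' (by rw [abs_lt]; omega)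
      omega
    · have b1n := PySem.Int.mod_nonneg a hpos
      have b1l := PySem.Int.mod_lt a hpos
      have b2n := PySem.Int.mod_nonneg b hpos
      have b2l := PySem.Int.mod_lt b hpos
      have h0 : PySem.Int.mod a m - PySem.Int.mod b m = 0 :=
        Int.eq_zero_of_abs_lt_dvd hd (by rw [abs_lt]; omega)
      omega

-- A as a nested sum over index triples
theorem pv_A_sum (S : List Int) (m : Int) :
    brute_force_3AP_count S m =
      ((pvR S).map (fun i => ((pvR S).map (fun j =>
        if j = i then 0
        else ((pvR S).map (fun k =>
          if k = i ∨ k = j then 0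
          else if PySem.Int.mod (pvG S j - pvG S i) m
                 = PySem.Int.mod (pvG S k - pvG S j) m then 1 else 0)).sum)).sum)).sum := by
  have hK : ∀ (i j acc : Int), (PySem.List.pyRange 0 (S.length : Int) 1).foldl
      (fun count k => if k = i ∨ k = j then count
        else if PySem.Int.mod (PySem.List.pyGetD S j 0 - PySem.List.pyGetD S i 0) m
               = PySem.Int.mod (PySem.List.pyGetD S k 0 - PySem.List.pyGetD S j 0) m
             then count + 1 else count) acc
      = acc + ((PySem.List.pyRange 0 (S.length : Int) 1).map (fun k =>
          if k = i ∨ k = j then 0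
          else if PySem.Int.mod (PySem.List.pyGetD S j 0 - PySem.List.pyGetD S i 0) m
                 = PySem.Int.mod (PySem.List.pyGetD S k 0 - PySem.List.pyGetD S j 0) m
               then 1 else 0)).sum := by
    intro i j acc
    exact pv_foldl_add _ _ _ (fun acc k => by split_ifs <;> ring) acc
  have hJ : ∀ (i acc : Int), (PySem.List.pyRange 0 (S.length : Int) 1).foldl
      (fun count j => if j = i then count
        else (PySem.List.pyRange 0 (S.length : Int) 1).foldl
          (fun count k => if k = i ∨ k = j then count
            else if PySem.Int.mod (PySem.List.pyGetD S j 0 - PySem.List.pyGetD S i 0) m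
                   = PySem.Int.mod (PySem.List.pyGetD S k 0 - PySem.List.pyGetD S j 0) m
                 then count + 1 else count) count) acc
      = acc + ((PySem.List.pyRange 0 (S.length : Int) 1).map (fun j =>
          if j = i then 0
          else ((PySem.List.pyRange 0 (S.length : Int) 1).map (fun k =>
            if k = i ∨ k = j then 0
            else if PySem.Int.mod (PySem.List.pyGetD S j 0 - PySem.List.pyGetD S i 0) m
                   = PySem.Int.mod (PySem.List.pyGetD S k 0 - PySem.List.pyGetD S j 0) m
                 then 1 else 0)).sum)).sum := by
    intro i acc
    refine pv_foldl_add _ _ _ (fun acc j => ?_) acc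
    by_cases hji : j = i
    · simp [hji]
    · rw [if_neg hji, if_neg hji, hK]
  unfold brute_force_3AP_count pvR pvG
  rw [pv_foldl_add _ _ _ (fun acc i => hJ i acc) 0]
  ring

-- fewer than three elements: no admissible index triple, A returns 0
theorem pv_sum_zero (L : List Int) (f : Int → Int) (h : ∀ x ∈ L, f x = 0) :
    (L.map f).sum = 0 := by
  rw [List.map_congr_left h]
  simp

theorem pv_A_small (S : List Int) (m : Int) (h : S.length < 3) :
    brute_force_3AP_count S m = 0 := by
  rw [pv_A_sum]
  apply pv_sum_zero
  intro i hi
  apply pv_sum_zero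
  intro j hj
  by_cases hji : j = i
  · simp [hji]
  · rw [if_neg hji]
    apply pv_sum_zero
    intro k hk
    have bi := PySem.List.mem_pyRange_one.mp hi
    have bj := PySem.List.mem_pyRange_one.mp hj
    have bk := PySem.List.mem_pyRange_one.mp hk
    have hn : (S.length : Int) < 3 := by exact_mod_cast h
    have : k = i ∨ k = j := by omega
    simp [this]

-- the common normal form of both programs (mod ≠ 0 path)
def pvT (S : List Int) (m : Int) : Int :=
  ((pvR S).map (fun i => ((pvR S).map (fun j => ((pvR S).map (fun k =>
    if j = i ∨ k = i ∨ k = j then 0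
    else if m ∣ (pvG S i + pvG S k - 2 * pvG S j) then 1 else 0)).sum)).sum)).sum

theorem pv_A_eq_T (S : List Int) (m : Int) (hm : m ≠ 0) :
    brute_force_3AP_count S m = pvT S m := by
  rw [pv_A_sum]
  unfold pvT
  apply congrArg
  apply List.map_congr_left
  intro i _
  apply congrArg
  apply List.map_congr_left
  intro j _
  by_cases hji : j = i
  · rw [if_pos hji]
    rw [pv_sum_zero]
    intro k _
    simp [hji]
  · rw [if_neg hji]
    apply congrArg
    apply List.map_congr_left
    intro k _
    by_cases hk : k = i ∨ k = j
    · simp [hk, hji]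
    · rw [if_neg hk, if_neg (by tauto : ¬ (j = i ∨ k = i ∨ k = j))]
      have hiff : (PySem.Int.mod (pvG S j - pvG S i) m = PySem.Int.mod (pvG S k - pvG S j) m)
          ↔ m ∣ (pvG S i + pvG S k - 2 * pvG S j) := by
        rw [pv_mod_eq_iff _ _ _ hm]
        have he : (pvG S j - pvG S i) - (pvG S k - pvG S j) = -(pvG S i + pvG S k - 2 * pvG S j) := by
          ring
        rw [he, dvd_neg]
      exact if_congr hiff rfl rfl

-- a 0/1 indicator sum is a count
theorem pv_sum_count (L : List Int) (K : Int) :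
    (L.map (fun v => if v = K then (1 : Int) else 0)).sum = L.count K := by
  induction L with
  | nil => simp
  | cons a t ih =>
      rw [List.map_cons, List.sum_cons, ih, List.count_cons]
      by_cases h : a = K
      · simp [h]; omega
      · simp [h]

-- the residue table looked up at K counts the j with (2*S[j]) % m = K
theorem pv_count (S : List Int) (m K : Int) :
    (S.foldl (fun d v => d.insert (PySem.Int.mod (2 * v) m)
        (d.getD (PySem.Int.mod (2 * v) m) 0 + 1)) (PySem.Dict.empty : PySem.Dict Int Int)).getD K 0
    = ((PySem.List.pyRange 0 (S.length : Int) 1).map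
        (fun j => if PySem.Int.mod (2 * PySem.List.pyGetD S j 0) m = K then (1 : Int) else 0)).sum := by
  have h1 : (S.foldl (fun d v => d.insert (PySem.Int.mod (2 * v) m)
        (d.getD (PySem.Int.mod (2 * v) m) 0 + 1)) (PySem.Dict.empty : PySem.Dict Int Int))
      = ((S.map (fun v => PySem.Int.mod (2 * v) m)).foldl
          (fun d x => d.insert x (d.getD x 0 + 1)) PySem.Dict.empty) := by
    rw [List.foldl_map]
  rw [h1, PySem.Dict.getD_foldl_insert_add_one]
  rw [show ((PySem.List.pyRange 0 (S.length : Int) 1).map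
        (fun j => if PySem.Int.mod (2 * PySem.List.pyGetD S j 0) m = K then (1 : Int) else 0))
      = (((PySem.List.pyRange 0 (S.length : Int) 1).map (fun j => PySem.List.pyGetD S j 0)).map
          (fun v => if PySem.Int.mod (2 * v) m = K then (1 : Int) else 0)) from by rw [List.map_map]; rfl]
  rw [PySem.List.map_pyGetD_pyRange_zero']
  rw [show (S.map (fun v => if PySem.Int.mod (2 * v) m = K then (1 : Int) else 0))
      = ((S.map (fun v => PySem.Int.mod (2 * v) m)).map (fun v => if v = K then (1 : Int) else 0)) from by
        rw [List.map_map]; rfl]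
  rw [pv_sum_count]
  simp

theorem pv_B_eq_T (S : List Int) (m : Int) (hm : m ≠ 0) (h3 : ¬ ((S.length : Int) < 3)) :
    brute_force_3AP_count_alt S m = pvT S m := by
  have hnodup : (PySem.List.pyRange 0 (S.length : Int) 1).Nodup := PySem.List.nodup_pyRange_one 0 (S.length : Int)
  have hK : ∀ (i acc : Int), (PySem.List.pyRange 0 (S.length : Int) 1).foldl
      (fun count k => if k = i then count
        else count + (S.foldl (fun d v => d.insert (PySem.Int.mod (2 * v) m)
            (d.getD (PySem.Int.mod (2 * v) m) 0 + 1)) (PySem.Dict.empty : PySem.Dict Int Int)).getD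
              (PySem.Int.mod (PySem.List.pyGetD S i 0 + PySem.List.pyGetD S k 0) m) 0
          - 2 * (if PySem.Int.mod (PySem.List.pyGetD S i 0 - PySem.List.pyGetD S k 0) m = 0
                 then 1 else 0)) acc
      = acc + ((PySem.List.pyRange 0 (S.length : Int) 1).map (fun k =>
          if k = i then 0
          else (S.foldl (fun d v => d.insert (PySem.Int.mod (2 * v) m)
            (d.getD (PySem.Int.mod (2 * v) m) 0 + 1)) (PySem.Dict.empty : PySem.Dict Int Int)).getD
              (PySem.Int.mod (PySem.List.pyGetD S i 0 + PySem.List.pyGetD S k 0) m) 0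
          - 2 * (if PySem.Int.mod (PySem.List.pyGetD S i 0 - PySem.List.pyGetD S k 0) m = 0
                 then 1 else 0))).sum := by
    intro i acc
    exact pv_foldl_add _ _ _ (fun acc k => by split_ifs <;> ring) acc
  unfold brute_force_3AP_count_alt
  rw [if_neg h3]
  rw [pv_foldl_add _ _ _ (fun acc i => hK i acc) 0]
  rw [zero_add]
  unfold pvT pvR pvG
  apply congrArg
  apply List.map_congr_left
  intro i hi
  have step1 : ((PySem.List.pyRange 0 (S.length : Int) 1).map (fun k =>
          if k = i then 0
          else (S.foldl (fun d v => d.insert (PySem.Int.mod (2 * v) m)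
            (d.getD (PySem.Int.mod (2 * v) m) 0 + 1)) (PySem.Dict.empty : PySem.Dict Int Int)).getD
              (PySem.Int.mod (PySem.List.pyGetD S i 0 + PySem.List.pyGetD S k 0) m) 0
          - 2 * (if PySem.Int.mod (PySem.List.pyGetD S i 0 - PySem.List.pyGetD S k 0) m = 0
                 then 1 else 0)))
      = ((PySem.List.pyRange 0 (S.length : Int) 1).map (fun k =>
          ((PySem.List.pyRange 0 (S.length : Int) 1).map (fun j =>
            if k = i ∨ j = i ∨ j = k then 0
            else if m ∣ (PySem.List.pyGetD S i 0 + PySem.List.pyGetD S k 0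
                   - 2 * PySem.List.pyGetD S j 0) then 1 else 0)).sum)) := by
    apply List.map_congr_left
    intro k hk
    by_cases hki : k = i
    · rw [if_pos hki]
      symm
      apply pv_sum_zero
      intro j _
      rw [if_pos (Or.inl hki)]
    · rw [if_neg hki, pv_count]
      have hdec : ∀ j ∈ (PySem.List.pyRange 0 (S.length : Int) 1),
          (fun j => if PySem.Int.mod (2 * PySem.List.pyGetD S j 0) m
              = PySem.Int.mod (PySem.List.pyGetD S i 0 + PySem.List.pyGetD S k 0) m
            then (1 : Int) else 0) j
          = (fun j =>
            ((if k = i ∨ j = i ∨ j = k then 0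
              else if m ∣ (PySem.List.pyGetD S i 0 + PySem.List.pyGetD S k 0
                     - 2 * PySem.List.pyGetD S j 0) then (1 : Int) else 0)
            + (if j = i then (if m ∣ (PySem.List.pyGetD S i 0 - PySem.List.pyGetD S k 0)
                              then (1 : Int) else 0) else 0))
            + (if j = k then (if m ∣ (PySem.List.pyGetD S i 0 - PySem.List.pyGetD S k 0)
                              then (1 : Int) else 0) else 0)) j := by
        intro j _
        simp only
        by_cases hji : j = i
        · have hiff : (PySem.Int.mod (2 * PySem.List.pyGetD S j 0) m
              = PySem.Int.mod (PySem.List.pyGetD S i 0 + PySem.List.pyGetD S k 0) m)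
              ↔ m ∣ (PySem.List.pyGetD S i 0 - PySem.List.pyGetD S k 0) := by
            rw [pv_mod_eq_iff _ _ _ hm, hji, show 2 * PySem.List.pyGetD S i 0
              - (PySem.List.pyGetD S i 0 + PySem.List.pyGetD S k 0)
              = PySem.List.pyGetD S i 0 - PySem.List.pyGetD S k 0 from by ring]
          rw [if_congr hiff rfl rfl]
          have hik : ¬ i = k := fun e => hki e.symm
          simp [hji, hik]
        · by_cases hjk : j = k
          · have hiff : (PySem.Int.mod (2 * PySem.List.pyGetD S j 0) m
                = PySem.Int.mod (PySem.List.pyGetD S i 0 + PySem.List.pyGetD S k 0) m)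
                ↔ m ∣ (PySem.List.pyGetD S i 0 - PySem.List.pyGetD S k 0) := by
              rw [pv_mod_eq_iff _ _ _ hm, hjk, show 2 * PySem.List.pyGetD S k 0
                - (PySem.List.pyGetD S i 0 + PySem.List.pyGetD S k 0)
                = PySem.List.pyGetD S k 0 - PySem.List.pyGetD S i 0 from by ring, dvd_sub_comm]
            rw [if_congr hiff rfl rfl]
            simp [hjk, hki]
          · have hiff : (PySem.Int.mod (2 * PySem.List.pyGetD S j 0) m
                = PySem.Int.mod (PySem.List.pyGetD S i 0 + PySem.List.pyGetD S k 0) m)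
                ↔ m ∣ (PySem.List.pyGetD S i 0 + PySem.List.pyGetD S k 0
                       - 2 * PySem.List.pyGetD S j 0) := by
              rw [pv_mod_eq_iff _ _ _ hm, show 2 * PySem.List.pyGetD S j 0
                - (PySem.List.pyGetD S i 0 + PySem.List.pyGetD S k 0)
                = -(PySem.List.pyGetD S i 0 + PySem.List.pyGetD S k 0
                    - 2 * PySem.List.pyGetD S j 0) from by ring, dvd_neg]
            rw [if_congr hiff rfl rfl]
            simp [hji, hjk, hki]
      rw [List.map_congr_left hdec, PySem.List.sum_map_add_int, PySem.List.sum_map_add_int,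
          pv_sum_single _ i _ hnodup hi, pv_sum_single _ k _ hnodup hk]
      simp only [PySem.Int.mod_eq_zero_iff_dvd]
      ring
  rw [step1, pv_sum_swap]
  apply congrArg
  apply List.map_congr_left
  intro j _
  apply congrArg
  apply List.map_congr_left
  intro k _
  exact if_congr (by omega) rfl rfl

-- ===== VERDICT (by name: the statement is the Claim_ definition above) =====
theorem brute_force_3AP_count_spec : Claim_equal_brute_force_3AP_count := by
  intro S m _ hpre
  unfold Spec_brute_force_3AP_count
  by_cases h3 : (S.length : Int) < 3
  · have hs : S.length < 3 := by exact_mod_cast h3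
    rw [pv_A_small S m hs]
    unfold brute_force_3AP_count_alt
    simp [h3]
  · have hm : m ≠ 0 := by
      rcases hpre with h | h
      · exact absurd (by exact_mod_cast h) h3
      · exact h
    rw [pv_A_eq_T S m hm, pv_B_eq_T S m hm h3]
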